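-- pv_equiv track=rewrite | github.com/rhCat/lpp | src/lpp/util/doc_generator/compute.py | generate_events_list
-- ===== SOURCE A (Python) =====
-- from typing import Any, Dict, List
--
-- def generate_events_list(params: Dict[str, Any]) -> Dict[str, Any]:
--     """Generate events documentation."""
--     bp = params.get("blueprint", {})
--     transitions = bp.get("transitions", [])
--
--     # Collect unique events
--     events: Dict[str, List[str]] = {}
--     for t in transitions:
--         event = t.get("on_event", "")
--         if event:
--             if event not in events:
--                 events[event] = []
--             events[event].append(
--                 f"`{t.get('from', '?')}` -> `{t.get('to', '?')}`")
--
--     if not events: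
--         return {"section": "## Events\n\n_No events defined._\n"}
--
--     lines = [
--         "## Events",
--         "",
--         "Events trigger state transitions in the blueprint.",
--         "",
--         "| Event | Transitions |",
--         "|-------|-------------|",
--     ]
--
--     for event, trans in sorted(events.items()):
--         trans_str = ", ".join(trans[:3])
--         if len(trans) > 3:
--             trans_str += f" (+{len(trans) - 3} more)"
--         lines.append(f"| `{event}` | {trans_str} |")
--
--     lines.append("")
--     return {"section": "\n".join(lines)}
-- ===== SOURCE B (Python) =====
-- def generate_events_list(params):
--     """Generate events documentation."""
--     bp = params.get("blueprint", {})
--     transitions = bp.get("transitions", [])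
--
--     # Distinct events, in sorted order; per event scan transitions for its rows.
--     events = sorted({t.get("on_event", "") for t in transitions if t.get("on_event", "")})
--
--     if not events:
--         return {"section": "## Events\n\n_No events defined._\n"}
--
--     lines = [
--         "## Events",
--         "",
--         "Events trigger state transitions in the blueprint.",
--         "",
--         "| Event | Transitions |",
--         "|-------|-------------|",
--     ]
--     for event in events:
--         trans = [f"`{t.get('from', '?')}` -> `{t.get('to', '?')}`"
--                  for t in transitions if t.get("on_event", "") == event]
--         trans_str = ", ".join(trans[:3])
--         if len(trans) > 3:
--             trans_str += f" (+{len(trans) - 3} more)"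
--         lines.append(f"| `{event}` | {trans_str} |")
--     lines.append("")
--     return {"section": "\n".join(lines)}
-- ===== Notes on version B (the rewrite author's own statement) =====
-- stated objective: idiomatic
-- what changed: Replaces A's incremental dict-of-lists accumulation (first-seen key order, then sorted items) by computing the sorted distinct events up front and rebuilding each event's formatted transition list with a per-event scan of the transitions.
import Mathlib
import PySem

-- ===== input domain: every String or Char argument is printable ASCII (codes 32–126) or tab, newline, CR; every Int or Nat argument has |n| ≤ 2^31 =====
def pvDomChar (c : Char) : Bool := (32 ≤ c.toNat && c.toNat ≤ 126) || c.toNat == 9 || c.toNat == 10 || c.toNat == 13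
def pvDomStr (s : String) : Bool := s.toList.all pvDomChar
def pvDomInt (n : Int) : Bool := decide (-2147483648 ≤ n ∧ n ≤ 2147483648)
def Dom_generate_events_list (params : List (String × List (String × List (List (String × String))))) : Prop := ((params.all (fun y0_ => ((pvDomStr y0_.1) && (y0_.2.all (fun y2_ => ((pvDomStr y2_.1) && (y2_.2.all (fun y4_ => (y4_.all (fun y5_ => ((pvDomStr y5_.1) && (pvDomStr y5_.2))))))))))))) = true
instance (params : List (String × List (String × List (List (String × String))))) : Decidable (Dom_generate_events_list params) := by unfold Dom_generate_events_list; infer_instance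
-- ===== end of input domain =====

-- B replaces A's dict-of-lists accumulation by sorting the distinct events and
-- rebuilding each event's transition strings with a per-event scan (idiomatic, not faster).

-- shared formatting helpers (both Pythons format rows / headers identically)
def pvGet {ν : Type} (xs : List (String × ν)) (k : String) (dflt : ν) : ν :=
  (PySem.Dict.mk xs).getD k dflt     -- x.get(k, dflt): first-match lookup on the assoc list

def pvEvent (t : List (String × String)) : String := pvGet t "on_event" ""

def pvFmt (t : List (String × String)) : String :=
  "`" ++ pvGet t "from" "?" ++ "` -> `" ++ pvGet t "to" "?" ++ "`"

def pvHeader : List String :=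
  ["## Events", "", "Events trigger state transitions in the blueprint.", "",
   "| Event | Transitions |", "|-------|-------------|"]

def pvNoEvents : List (String × String) := [("section", "## Events\n\n_No events defined._\n")]

def pvRow (event : String) (trans : List String) : String :=
  let transStr := PySem.Str.join ", " (PySem.List.slice trans none (some 3))
  let transStr := if 3 < trans.length then
      transStr ++ " (+" ++ PySem.Int.toStr ((trans.length : Int) - 3) ++ " more)"
    else transStr
  "| `" ++ event ++ "` | " ++ transStr ++ " |"

-- ===== PORT A =====
-- the body of A's accumulation loop over transitions
def pvStepA (d : PySem.Dict String (List String)) (t : List (String × String)) :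
    PySem.Dict String (List String) :=
  let event := pvEvent t
  if event ≠ "" then
    let d' := if d.contains event = false then d.insert event ([] : List String) else d
    d'.insert event (d'.getD event [] ++ [pvFmt t])
  else d

def generate_events_list (params : List (String × List (String × List (List (String × String))))) : List (String × String) :=
  let bp := pvGet params "blueprint" []
  let transitions := pvGet bp "transitions" []
  let events := transitions.foldl pvStepA PySem.Dict.empty
  if events.items = [] then pvNoEvents
  else
    let lines := pvHeader
    -- sorted(events.items()): the keys are distinct, so Python's tuple sort is the sort by key
    let lines := (PySem.List.sorted events.items (fun p => p.1) false).foldl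
        (fun acc p => acc ++ [pvRow p.1 p.2]) lines
    let lines := lines ++ [""]
    [("section", PySem.Str.join "\n" lines)]

-- ===== PORT B =====
def generate_events_list_alt (params : List (String × List (String × List (List (String × String))))) : List (String × String) :=
  let bp := pvGet params "blueprint" []
  let transitions := pvGet bp "transitions" []
  let events := PySem.List.sorted
      (PySem.Set.ofList ((transitions.filter (fun t => pvEvent t != "")).map pvEvent))
      (fun e => e) false
  if events = [] then pvNoEvents
  else
    let rows := events.map (fun e =>
      pvRow e ((transitions.filter (fun t => pvEvent t == e)).map pvFmt))
    [("section", PySem.Str.join "\n" (pvHeader ++ rows ++ [""]))]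

-- ===== PRECONDITION & SPEC =====
def Spec_generate_events_list (params : List (String × List (String × List (List (String × String))))) (out : List (String × String)) : Prop := out = generate_events_list_alt params
instance (params : List (String × List (String × List (List (String × String))))) (out : List (String × String)) : Decidable (Spec_generate_events_list params out) := by unfold Spec_generate_events_list; infer_instance

-- ===== CLAIM (what is proved, stated in full; the proofs are below) =====
def Claim_equal_generate_events_list : Prop := ∀ (params : List (String × List (String × List (List (String × String))))), Dom_generate_events_list params → Spec_generate_events_list params (generate_events_list params)

-- ===== LEMMAS AND PROOFS =====

theorem pvStepA_getD (d : PySem.Dict String (List String)) (t : List (String × String))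
    (e : String) :
    (pvStepA d t).getD e [] =
      if pvEvent t ≠ "" ∧ e = pvEvent t then d.getD e [] ++ [pvFmt t] else d.getD e [] := by
  unfold pvStepA
  by_cases h : pvEvent t ≠ ""
  · by_cases hc : d.contains (pvEvent t) = false
    · have h0 : d.getD (pvEvent t) [] = [] := by
        simp [PySem.Dict.getD_of_not_contains, hc]
      by_cases he : e = pvEvent t <;> simp [h, hc, he, PySem.Dict.getD_insert, h0]
    · by_cases he : e = pvEvent t <;> simp [h, hc, he, PySem.Dict.getD_insert]
  · simp [h]

theorem pvStepA_keys (d : PySem.Dict String (List String)) (t : List (String × String)) :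
    (pvStepA d t).keys =
      if pvEvent t ≠ "" then PySem.Set.add d.keys (pvEvent t) else d.keys := by
  unfold pvStepA
  by_cases h : pvEvent t ≠ ""
  · by_cases hc : d.contains (pvEvent t) = false
    · have hm : pvEvent t ∉ d.keys := fun hmem => by
        simp [(PySem.Dict.contains_iff_mem_keys d (pvEvent t)).2 hmem] at hc
      simp [h, hc, PySem.Dict.keys_insert_of_contains, PySem.Dict.keys_insert_of_not_contains,
        PySem.Dict.contains_insert_self, PySem.Set.add, hm]
    · simp only [Bool.not_eq_false] at hc
      have hm : pvEvent t ∈ d.keys := (PySem.Dict.contains_iff_mem_keys d (pvEvent t)).1 hc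
      simp [h, hc, PySem.Dict.keys_insert_of_contains, PySem.Set.add, hm]
  · simp [h]

theorem pvFold_getD (l : List (List (String × String))) (d : PySem.Dict String (List String))
    (e : String) :
    (l.foldl pvStepA d).getD e [] =
      d.getD e [] ++ ((l.filter (fun t => pvEvent t != "" && pvEvent t == e)).map pvFmt) := by
  induction l generalizing d with
  | nil => simp
  | cons t l ih =>
    simp only [List.foldl_cons, ih, pvStepA_getD, List.filter_cons]
    by_cases h : pvEvent t ≠ "" ∧ e = pvEvent t
    · obtain ⟨h1, h2⟩ := h
      subst h2
      simp [h1]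
    · rw [if_neg h]
      have : (pvEvent t != "" && pvEvent t == e) = false := by
        rcases not_and_or.1 h with h1 | h2
        · simp only [ne_eq, not_not] at h1; simp [h1]
        · have : ¬ pvEvent t = e := fun hh => h2 hh.symm
          simp [this]
      simp [this]

theorem pvFold_keys (l : List (List (String × String))) (d : PySem.Dict String (List String)) :
    (l.foldl pvStepA d).keys =
      PySem.Set.update d.keys ((l.filter (fun t => pvEvent t != "")).map pvEvent) := by
  induction l generalizing d with
  | nil => simp [PySem.Set.update]
  | cons t l ih =>
    simp only [List.foldl_cons, ih, pvStepA_keys, List.filter_cons]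
    by_cases h : pvEvent t ≠ ""
    · simp [h, PySem.Set.update_cons]
    · simp [h]

-- main equivalence, stated over the shared transitions list
theorem pvBody_eq (ts : List (List (String × String))) :
    (let events := ts.foldl pvStepA PySem.Dict.empty
     if events.items = [] then pvNoEvents
     else
       let lines := pvHeader
       let lines := (PySem.List.sorted events.items (fun p => p.1) false).foldl
           (fun acc p => acc ++ [pvRow p.1 p.2]) lines
       let lines := lines ++ [""]
       [("section", PySem.Str.join "\n" lines)])
    =
    (let events := PySem.List.sorted
        (PySem.Set.ofList ((ts.filter (fun t => pvEvent t != "")).map pvEvent))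
        (fun e => e) false
     if events = [] then pvNoEvents
     else
       let rows := events.map (fun e =>
         pvRow e ((ts.filter (fun t => pvEvent t == e)).map pvFmt))
       [("section", PySem.Str.join "\n" (pvHeader ++ rows ++ [""]))]) := by
  set F := ts.filter (fun t => pvEvent t != "") with hF
  set K := PySem.Set.ofList (F.map pvEvent) with hK
  set events := ts.foldl pvStepA PySem.Dict.empty with hev
  have hkeys : events.keys = K := by
    rw [hev, pvFold_keys]
    simp [PySem.Dict.keys_empty, PySem.Set.update_nil_left, hK, hF]
  have hnd : events.keys.Nodup := by
    rw [hkeys, hK]; exact PySem.Set.nodup_ofList _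
  have hitems : events.items = K.map (fun k => (k, events.getD k [])) := by
    rw [← hkeys]; exact PySem.Dict.items_eq_map_keys events hnd []
  set S := PySem.List.sorted K (fun e => e) false with hS
  have hsortasS : PySem.List.sorted events.items (fun p => p.1) false
      = S.map (fun k => (k, events.getD k [])) := by
    apply PySem.List.sorted_eq_of_perm_of_pairwise_lt
    · rw [hitems]
      exact (PySem.List.sorted_perm K (fun e => e) false).map _
    · have hp : S.Pairwise (· < ·) := by
        rw [hS, hK]; exact PySem.List.sorted_ofList_pairwise_lt _
      exact List.pairwise_map.2 (by simpa using hp)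
  have hempty : (events.items = []) ↔ (S = []) := by
    rw [hitems, hS]
    simp [PySem.List.sorted_eq_nil_iff]
  by_cases h0 : events.items = []
  · simp only [h0, if_pos]
    rw [hempty.1 h0] at hS ⊢
    simp
  · have h0' : ¬ S = [] := fun h => h0 (hempty.2 h)
    simp only [h0, h0', if_neg, not_false_eq_true]
    refine congrArg (fun s => [("section", PySem.Str.join "\n" s)]) ?_
    rw [hsortasS, PySem.List.foldl_append_singleton_eq_map, List.map_map,
      List.append_assoc]
    refine congrArg (fun r => pvHeader ++ (r ++ [""])) ?_
    refine List.map_congr_left ?_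
    intro e heS
    have heK : e ∈ K := ((PySem.List.mem_sorted _ _ _ _).1 heS)
    have hene : e ≠ "" := by
      rw [hK] at heK
      have : e ∈ F.map pvEvent := (PySem.Set.mem_ofList _ _).1 heK
      obtain ⟨t, htF, hte⟩ := List.mem_map.1 this
      have := List.of_mem_filter htF
      simp only [bne_iff_ne, ne_eq] at this
      rw [← hte]; exact this
    have hg : events.getD e [] = (ts.filter (fun t => pvEvent t == e)).map pvFmt := by
      rw [hev, pvFold_getD]
      simp only [PySem.Dict.getD_empty, List.nil_append]
      congr 1
      apply List.filter_congr
      intro t _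
      by_cases hte : pvEvent t = e
      · simp [hte, hene]
      · simp [hte]
    simp [Function.comp, hg]

-- ===== VERDICT (by name: the statement is the Claim_ definition above) =====
theorem generate_events_list_spec : Claim_equal_generate_events_list := by
  intro params _
  unfold Spec_generate_events_list generate_events_list generate_events_list_alt
  exact pvBody_eq _
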